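-- pv_equiv track=rewrite | github.com/Jayasimha321/quantum-maps-pro | backend/modules/quantum_solver_optimized.py | decode_one_hot_to_route
-- ===== SOURCE A (Python) =====
-- from typing import List, Tuple, Dict, Optional
--
-- def qubit_index(city: int, time: int, num_cities: int) -> int:
--     """
--     Map (city, time) to qubit index in one-hot encoding.
--     City 0 is fixed at time 0, so we only encode cities 1..n-1 at times 1..n-1
--
--     Args:
--         city: City index (1 to n-1)
--         time: Time step (1 to n-1)
--         num_cities: Total number of cities
--
--     Returns:
--         Qubit index
--     """
--     # Adjust for fixed starting city
--     adjusted_city = city - 1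
--     adjusted_time = time - 1
--     n_minus_1 = num_cities - 1
--
--     return adjusted_city * n_minus_1 + adjusted_time
--
-- def decode_one_hot_to_route(bitstring: str, num_cities: int) -> List[int]:
--     """
--     Decode one-hot bitstring to route.
--
--     Args:
--         bitstring: Binary string from quantum measurement
--         num_cities: Number of cities
--
--     Returns:
--         Route as list of city indices
--     """
--     n_minus_1 = num_cities - 1
--     route = [0]  # Start at city 0
--
--     # For each time step, find which city is visited
--     for t in range(1, num_cities):
--         for c in range(1, num_cities):
--             idx = qubit_index(c, t, num_cities)
--             if idx < len(bitstring) and bitstring[-(idx+1)] == '1':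
--                 route.append(c)
--                 break
--         else:
--             # If no city found for this time step, use greedy assignment
--             # Find unvisited city
--             for c in range(1, num_cities):
--                 if c not in route:
--                     route.append(c)
--                     break
--
--     return route
-- ===== SOURCE B (Python) =====
-- def decode_one_hot_to_route(bitstring, num_cities):
--     m = num_cities - 1
--     # Pass 1: scan the bitstring once (positions counted from the right) and
--     # record, for each time step, the smallest city whose one-hot bit is set.
--     first_city = {}
--     if m > 0:
--         limit = m * m
--         for p, ch in enumerate(reversed(bitstring)):
--             if ch == '1' and p < limit:
--                 t = p % m + 1
--                 if t not in first_city: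
--                     first_city[t] = p // m + 1
--     # Pass 2: build the route, falling back to the smallest unvisited city.
--     route = [0]
--     visited = {0}
--     for t in range(1, num_cities):
--         c = first_city.get(t)
--         if c is None:
--             for u in range(1, num_cities):
--                 if u not in visited:
--                     c = u
--                     break
--         if c is not None:
--             route.append(c)
--             visited.add(c)
--     return route
-- ===== Notes on version B (the rewrite author's own statement) =====
-- stated objective: alternative
-- what changed: A rescans all cities for every time step (nested loops with a per-step bit probe and a linear route-membership fallback); B makes one pass over the bitstring to tabulate the smallest city per time step in a dict, then one fill pass over time steps using that table and a visited set.
import Mathlib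
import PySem

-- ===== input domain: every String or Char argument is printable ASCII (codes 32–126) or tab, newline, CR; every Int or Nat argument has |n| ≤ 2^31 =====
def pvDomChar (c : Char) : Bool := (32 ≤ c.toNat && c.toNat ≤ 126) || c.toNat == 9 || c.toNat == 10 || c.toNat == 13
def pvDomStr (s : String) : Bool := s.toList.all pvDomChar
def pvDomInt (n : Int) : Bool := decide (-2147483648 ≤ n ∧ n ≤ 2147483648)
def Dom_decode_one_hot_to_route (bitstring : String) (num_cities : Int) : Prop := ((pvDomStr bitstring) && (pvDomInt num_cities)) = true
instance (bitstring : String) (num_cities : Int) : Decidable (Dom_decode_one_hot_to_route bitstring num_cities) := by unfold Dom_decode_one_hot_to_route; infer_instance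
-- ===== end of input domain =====

-- B replaces A's per-time rescan of all cities by one left-to-right scan of the bitstring that
-- tabulates the smallest city per time step, then a single fill pass with a visited set (objective: alternative).

-- ===== PORT A =====
def qubit_index (city : Int) (time : Int) (num_cities : Int) : Int :=
  (city - 1) * (num_cities - 1) + (time - 1)

def decode_one_hot_to_route (bitstring : String) (num_cities : Int) : List Int :=
  let cs := bitstring.toList
  (PySem.List.pyRange 1 num_cities 1).foldl (fun route t =>
    match (PySem.List.pyRange 1 num_cities 1).find? (fun c =>
        decide (qubit_index c t num_cities < PySem.List.len cs) &&
          (PySem.List.pyGet? cs (-(qubit_index c t num_cities + 1)) == some '1')) with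
    | some c => route ++ [c]
    | none =>
      match (PySem.List.pyRange 1 num_cities 1).find? (fun c => !(route.contains c)) with
      | some c => route ++ [c]
      | none => route) [0]

-- ===== PORT B =====
def decode_one_hot_to_route_alt (bitstring : String) (num_cities : Int) : List Int :=
  let m := num_cities - 1
  let table : PySem.Dict Int Int :=
    if m > 0 then
      (PySem.List.enumerate bitstring.toList.reverse 0).foldl (fun d pc =>
        if pc.2 == '1' && decide (pc.1 < m * m) then
          if d.contains (PySem.Int.mod pc.1 m + 1) then d
          else d.insert (PySem.Int.mod pc.1 m + 1) (PySem.Int.floordiv pc.1 m + 1)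
        else d) PySem.Dict.empty
    else PySem.Dict.empty
  ((PySem.List.pyRange 1 num_cities 1).foldl (fun st t =>
    let c? : Option Int :=
      match table.get? t with
      | some c => some c
      | none => (PySem.List.pyRange 1 num_cities 1).find? (fun u => !(PySem.Set.contains st.2 u))
    match c? with
    | some c => (st.1 ++ [c], PySem.Set.add st.2 c)
    | none => st) ([0], PySem.Set.ofList [0])).1

-- ===== PRECONDITION & SPEC =====
def Spec_decode_one_hot_to_route (bitstring : String) (num_cities : Int) (out : List Int) : Prop := out = decode_one_hot_to_route_alt bitstring num_cities
instance (bitstring : String) (num_cities : Int) (out : List Int) : Decidable (Spec_decode_one_hot_to_route bitstring num_cities out) := by unfold Spec_decode_one_hot_to_route; infer_instance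

-- ===== CLAIM (what is proved, stated in full; the proofs are below) =====
def Claim_equal_decode_one_hot_to_route : Prop := ∀ (bitstring : String) (num_cities : Int), Dom_decode_one_hot_to_route bitstring num_cities → Spec_decode_one_hot_to_route bitstring num_cities (decode_one_hot_to_route bitstring num_cities)


-- ===== LEMMAS AND PROOFS =====

-- A's inner-loop predicate and per-time-step body, named for the proofs
def pA (s : String) (n t c : Int) : Bool :=
  decide (qubit_index c t n < PySem.List.len s.toList) &&
    (PySem.List.pyGet? s.toList (-(qubit_index c t n + 1)) == some '1')

def stepA (s : String) (n : Int) (route : List Int) (t : Int) : List Int :=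
  match (PySem.List.pyRange 1 n 1).find? (pA s n t) with
  | some c => route ++ [c]
  | none =>
    match (PySem.List.pyRange 1 n 1).find? (fun c => !(route.contains c)) with
    | some c => route ++ [c]
    | none => route

lemma decodeA_eq (s : String) (n : Int) :
    decode_one_hot_to_route s n = (PySem.List.pyRange 1 n 1).foldl (stepA s n) [0] := rfl

-- B's table predicate, table-building body, table and per-time-step body, named
def qB (m : Int) (pc : Int × Char) : Bool := pc.2 == '1' && decide (pc.1 < m * m)

def dstep (m : Int) (d : PySem.Dict Int Int) (pc : Int × Char) : PySem.Dict Int Int :=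
  if qB m pc then
    if d.contains (PySem.Int.mod pc.1 m + 1) then d
    else d.insert (PySem.Int.mod pc.1 m + 1) (PySem.Int.floordiv pc.1 m + 1)
  else d

def tbl (s : String) (n : Int) : PySem.Dict Int Int :=
  if n - 1 > 0 then
    (PySem.List.enumerate s.toList.reverse 0).foldl (dstep (n - 1)) PySem.Dict.empty
  else PySem.Dict.empty

def stepB (n : Int) (tb : PySem.Dict Int Int) (st : List Int × PySem.Set Int) (t : Int) :
    List Int × PySem.Set Int :=
  let c? : Option Int :=
    match tb.get? t with
    | some c => some c
    | none => (PySem.List.pyRange 1 n 1).find? (fun u => !(PySem.Set.contains st.2 u))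
  match c? with
  | some c => (st.1 ++ [c], PySem.Set.add st.2 c)
  | none => st

lemma decodeB_eq (s : String) (n : Int) :
    decode_one_hot_to_route_alt s n =
      ((PySem.List.pyRange 1 n 1).foldl (stepB n (tbl s n)) ([0], PySem.Set.ofList [0])).1 := rfl

-- what the table-building fold leaves at key t: the first matching bit, unless t was present
lemma get_dstep_foldl (m : Int) (l : List (Int × Char)) (d : PySem.Dict Int Int) (t : Int) :
    (l.foldl (dstep m) d).get? t =
      match d.get? t with
      | some v => some v
      | none => (l.find? (fun pc => qB m pc && (PySem.Int.mod pc.1 m + 1 == t))).map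
          (fun pc => PySem.Int.floordiv pc.1 m + 1) := by
  induction l generalizing d with
  | nil => cases h : d.get? t <;> simp [h]
  | cons x xs ih =>
    rw [List.foldl_cons, ih, List.find?_cons]
    by_cases hq : qB m x = true
    · by_cases hk : PySem.Int.mod x.1 m + 1 = t
      · by_cases hc : d.contains (PySem.Int.mod x.1 m + 1) = true
        · have hstay : dstep m d x = d := by unfold dstep; rw [if_pos hq, if_pos hc]
          obtain ⟨v, hv⟩ : ∃ v, d.get? t = some v := by
            rw [← hk]
            rw [PySem.Dict.contains_eq_isSome_get?] at hc
            exact Option.isSome_iff_exists.1 hc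
          simp [hstay, hv]
        · have hins : dstep m d x =
              d.insert (PySem.Int.mod x.1 m + 1) (PySem.Int.floordiv x.1 m + 1) := by
            unfold dstep; rw [if_pos hq, if_neg hc]
          have hd : d.get? t = none := by
            rw [← hk]
            rw [PySem.Dict.contains_eq_isSome_get?] at hc
            simpa using hc
          have hpred : (qB m x && (PySem.Int.mod x.1 m + 1 == t)) = true := by
            rw [Bool.and_eq_true, beq_iff_eq]; exact ⟨hq, hk⟩
          rw [hins, hk, PySem.Dict.get?_insert_self, hd]
          simp [hq]
      · have hpred : (qB m x && (PySem.Int.mod x.1 m + 1 == t)) = false := by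
          simp [hk]
        have hsame : (dstep m d x).get? t = d.get? t := by
          unfold dstep
          rw [if_pos hq]
          split
          · rfl
          · exact PySem.Dict.get?_insert_of_ne _ _ (fun h => hk h.symm)
        rw [hsame, hpred]
    · have hstay : dstep m d x = d := by unfold dstep; rw [if_neg hq]
      have hpred : (qB m x && (PySem.Int.mod x.1 m + 1 == t)) = false := by
        simp [hq]
      rw [hstay, hpred]

-- find? on a list strictly sorted by a rank returns exactly the rank-least satisfying element
lemma find?_ranked_eq_some_iff {α : Type} (r : α → Int) (l : List α)
    (hl : l.Pairwise (fun u v => r u < r v)) (p : α → Bool) (x : α) :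
    l.find? p = some x ↔ x ∈ l ∧ p x = true ∧ ∀ y ∈ l, r y < r x → p y = false := by
  constructor
  · intro h
    rw [List.find?_eq_some_iff_append] at h
    obtain ⟨hpx, l₁, l₂, rfl, hfail⟩ := h
    refine ⟨by simp, hpx, ?_⟩
    intro y hy hlt
    rw [List.pairwise_append] at hl
    rcases List.mem_append.1 hy with h1 | h2
    · simpa using hfail y h1
    · rcases List.mem_cons.1 h2 with rfl | h3
      · omega
      · have := (List.pairwise_cons.1 hl.2.1).1 y h3
        omega
  · rintro ⟨hmem, hpx, hmin⟩
    obtain ⟨l₁, l₂, rfl⟩ := List.append_of_mem hmem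
    rw [List.pairwise_append] at hl
    rw [List.find?_append]
    have h1 : l₁.find? p = none := by
      rw [List.find?_eq_none]
      intro y hy
      have hr : r y < r x := hl.2.2 y hy x (by simp)
      simp [hmin y (by simp [hy]) hr]
    simp [h1, hpx]

-- A's bit test, characterised over the reversed character list
lemma pA_eq_true_iff (s : String) (n t c : Int) (h0 : 0 ≤ (c - 1) * (n - 1) + (t - 1)) :
    pA s n t c = true ↔ ∃ k : Nat, (k : Int) = (c - 1) * (n - 1) + (t - 1) ∧
      k < s.toList.reverse.length ∧ s.toList.reverse[k]? = some '1' := by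
  unfold pA qubit_index
  constructor
  · intro h
    rw [Bool.and_eq_true, decide_eq_true_iff, beq_iff_eq] at h
    obtain ⟨h1, h2⟩ := h
    simp only [pysem] at h1 h2
    generalize hidx : (c - 1) * (n - 1) + (t - 1) = idx at h0 h1 h2 ⊢
    have hlen : idx < (s.toList.length : Int) := by simpa using h1
    have hcast : -(idx + 1) = -((idx.toNat + 1 : Nat) : Int) := by push_cast; omega
    rw [hcast, PySem.List.pyGet?_neg_natCast s.toList (idx.toNat + 1) (by omega) (by omega)] at h2
    refine ⟨idx.toNat, by omega, by rw [List.length_reverse]; omega, ?_⟩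
    rw [List.getElem?_reverse (by omega)]
    have : s.toList.length - 1 - idx.toNat = s.toList.length - (idx.toNat + 1) := by omega
    rw [this]
    exact h2
  · rintro ⟨k, hk, hklt, hkbit⟩
    rw [Bool.and_eq_true, decide_eq_true_iff, beq_iff_eq]
    simp only [pysem]
    rw [List.length_reverse] at hklt
    constructor
    · omega
    · have hcast : -((c - 1) * (n - 1) + (t - 1) + 1) = -((k + 1 : Nat) : Int) := by push_cast; omega
      rw [hcast, PySem.List.pyGet?_neg_natCast s.toList (k + 1) (by omega) (by omega)]
      rw [List.getElem?_reverse (by simpa using hklt)] at hkbit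
      have : s.toList.length - 1 - k = s.toList.length - (k + 1) := by omega
      rw [this] at hkbit
      exact hkbit

-- decoding a raw bit position k < m*m: city bounds and the reconstruction identity
lemma pos_decomp (m : Int) (hm : 0 < m) (k : Int) (hk : 0 ≤ k) (hlt : k < m * m) :
    0 ≤ PySem.Int.floordiv k m ∧ PySem.Int.floordiv k m < m ∧
      k = PySem.Int.floordiv k m * m + PySem.Int.mod k m := by
  have hid := PySem.Int.floordiv_mul_add_mod k m
  have hr0 : 0 ≤ PySem.Int.mod k m := PySem.Int.mod_nonneg k hm
  have hrm : PySem.Int.mod k m < m := PySem.Int.mod_lt k hm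
  set f := PySem.Int.floordiv k m with hf
  have h1 : 0 ≤ f := by
    by_contra h
    have : f ≤ -1 := by omega
    have := mul_le_mul_of_nonneg_right this (le_of_lt hm)
    linarith
  have h2 : f + 1 ≤ m := by
    by_contra h
    have : m ≤ f := by omega
    have := mul_le_mul_of_nonneg_right this (le_of_lt hm)
    linarith
  refine ⟨h1, by omega, by linarith⟩

lemma mod_mul_add (m r a : Int) (hm : 0 < m) (h0 : 0 ≤ r) (hr : r < m) :
    PySem.Int.mod (a * m + r) m = r := by
  rw [PySem.Int.mod_eq_emod_of_pos hm]
  have h : a * m + r = r + m * a := by ring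
  rw [h, Int.add_mul_emod_self_left, Int.emod_eq_of_lt h0 hr]

lemma floordiv_mul_add (m r a : Int) (hm : 0 < m) (h0 : 0 ≤ r) (hr : r < m) :
    PySem.Int.floordiv (a * m + r) m = a := by
  rw [PySem.Int.floordiv_eq_iff_of_pos hm]
  constructor <;> nlinarith

-- the table agrees with A's inner scan on every time step of the loop
lemma tbl_get_eq (s : String) (n : Int) (hn : 2 ≤ n) (t : Int) (ht1 : 1 ≤ t) (ht2 : t ≤ n - 1) :
    (tbl s n).get? t = (PySem.List.pyRange 1 n 1).find? (pA s n t) := by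
  have hm : (0:Int) < n - 1 := by omega
  have hL : (tbl s n).get? t =
      ((PySem.List.enumerate s.toList.reverse 0).find?
        (fun pc => qB (n - 1) pc && (PySem.Int.mod pc.1 (n - 1) + 1 == t))).map
        (fun pc => PySem.Int.floordiv pc.1 (n - 1) + 1) := by
    unfold tbl
    rw [if_pos (by omega), get_dstep_foldl, PySem.Dict.get?_empty]
  rw [hL]
  cases hf : (PySem.List.pyRange 1 n 1).find? (pA s n t) with
  | none =>
    rw [List.find?_eq_none] at hf
    rw [Option.map_eq_none_iff, List.find?_eq_none]
    intro pc hpc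
    rw [PySem.List.mem_enumerate_iff] at hpc
    obtain ⟨k, hk, rfl⟩ := hpc
    simp only [zero_add]
    intro hq
    rw [Bool.and_eq_true, beq_iff_eq] at hq
    obtain ⟨hqb, hmodt⟩ := hq
    unfold qB at hqb
    rw [Bool.and_eq_true, beq_iff_eq, decide_eq_true_iff] at hqb
    obtain ⟨hch0, hlt0⟩ := hqb
    have hch : s.toList.reverse[k] = '1' := by simpa using hch0
    have hlt : ((k : Nat) : Int) < (n - 1) * (n - 1) := by simpa using hlt0
    have hmodt' : PySem.Int.mod ((k : Nat) : Int) (n - 1) + 1 = t := by simpa using hmodt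
    obtain ⟨hd0, hdm, hdec⟩ := pos_decomp (n - 1) hm k (Int.natCast_nonneg k) hlt
    have hcval : (k : Int) = (PySem.Int.floordiv (k : Int) (n - 1) + 1 - 1) * (n - 1) + (t - 1) := by
      have : (PySem.Int.floordiv (k : Int) (n - 1) + 1 - 1) * (n - 1)
          = PySem.Int.floordiv (k : Int) (n - 1) * (n - 1) := by ring
      rw [this]
      linarith [hdec, hmodt']
    have hpa : pA s n t (PySem.Int.floordiv (k : Int) (n - 1) + 1) = true := by
      rw [pA_eq_true_iff s n t _ (by linarith [hcval, Int.natCast_nonneg k])]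
      refine ⟨k, hcval, hk, ?_⟩
      rw [List.getElem?_eq_getElem hk, hch]
    exact (hf _ (by rw [PySem.List.mem_pyRange_one]; omega)) hpa
  | some c =>
    obtain ⟨hcmem, hpc, hmin⟩ :=
      (find?_ranked_eq_some_iff (fun x => x) _ (PySem.List.pairwise_lt_pyRange_one 1 n) (pA s n t) c).1 hf
    rw [PySem.List.mem_pyRange_one] at hcmem
    have h0 : (0:Int) ≤ (c - 1) * (n - 1) + (t - 1) := by nlinarith [hcmem.1, ht1, hm]
    obtain ⟨k, hkval, hklt, hkbit⟩ := (pA_eq_true_iff s n t c h0).1 hpc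
    have hkg : s.toList.reverse[k] = '1' := by
      rw [List.getElem?_eq_getElem hklt] at hkbit
      exact Option.some.inj hkbit
    have henum : (PySem.List.enumerate s.toList.reverse 0).find?
        (fun pc => qB (n - 1) pc && (PySem.Int.mod pc.1 (n - 1) + 1 == t))
        = some ((0:Int) + (k : Int), s.toList.reverse[k]) := by
      rw [find?_ranked_eq_some_iff (fun pc => pc.1) _ (PySem.List.pairwise_lt_enumerate _ 0)]
      refine ⟨(PySem.List.mem_enumerate_iff _ _ _).2 ⟨k, hklt, rfl⟩, ?_, ?_⟩
      · rw [Bool.and_eq_true, beq_iff_eq]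
        constructor
        · unfold qB
          rw [Bool.and_eq_true, beq_iff_eq, decide_eq_true_iff]
          refine ⟨hkg, ?_⟩
          simp only [zero_add]
          rw [hkval]
          nlinarith [hcmem.2, ht1, ht2, hm]
        · simp only [zero_add]
          rw [hkval, mod_mul_add (n - 1) (t - 1) (c - 1) hm (by omega) (by omega)]
          omega
      · intro y hy hylt
        rw [PySem.List.mem_enumerate_iff] at hy
        obtain ⟨j, hj, rfl⟩ := hy
        simp only [zero_add] at hylt
        by_contra hq
        rw [Bool.not_eq_false, Bool.and_eq_true, beq_iff_eq] at hq
        obtain ⟨hqb, hmodt⟩ := hq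
        unfold qB at hqb
        rw [Bool.and_eq_true, beq_iff_eq, decide_eq_true_iff] at hqb
        obtain ⟨hch0, hlt0⟩ := hqb
        have hch : s.toList.reverse[j] = '1' := by simpa using hch0
        have hlt : ((j : Nat) : Int) < (n - 1) * (n - 1) := by simpa using hlt0
        have hmodt' : PySem.Int.mod ((j : Nat) : Int) (n - 1) + 1 = t := by simpa using hmodt
        obtain ⟨hd0, hdm, hdec⟩ := pos_decomp (n - 1) hm j (Int.natCast_nonneg j) hlt
        have hcval : (j : Int) = (PySem.Int.floordiv (j : Int) (n - 1) + 1 - 1) * (n - 1) + (t - 1) := by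
          have : (PySem.Int.floordiv (j : Int) (n - 1) + 1 - 1) * (n - 1)
              = PySem.Int.floordiv (j : Int) (n - 1) * (n - 1) := by ring
          rw [this]
          linarith [hdec, hmodt']
        have hclt : PySem.Int.floordiv (j : Int) (n - 1) + 1 < c := by
          have hjk : (j : Int) < (k : Int) := by exact_mod_cast hylt
          have h1 : PySem.Int.floordiv (j : Int) (n - 1) * (n - 1) < (c - 1) * (n - 1) := by
            linarith [hcval, hkval, hjk]
          have := lt_of_mul_lt_mul_right h1 (le_of_lt hm)
          omega
        have hpa' : pA s n t (PySem.Int.floordiv (j : Int) (n - 1) + 1) = true := by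
          rw [pA_eq_true_iff s n t _ (by linarith [hcval, Int.natCast_nonneg j])]
          refine ⟨j, hcval, hj, ?_⟩
          rw [List.getElem?_eq_getElem hj, hch]
        have hfalse := hmin (PySem.Int.floordiv (j : Int) (n - 1) + 1)
          (by rw [PySem.List.mem_pyRange_one]; omega) hclt
        rw [hpa'] at hfalse
        simp at hfalse
    rw [henum]
    simp only [Option.map_some]
    congr 1
    simp only [zero_add]
    rw [hkval, floordiv_mul_add (n - 1) (t - 1) (c - 1) hm (by omega) (by omega)]
    ring

-- the two second-pass loops agree, given the table lookups match A's scans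
lemma loop_eq (s : String) (n : Int) (tb : PySem.Dict Int Int) :
    ∀ (ts : List Int), (∀ t ∈ ts, tb.get? t = (PySem.List.pyRange 1 n 1).find? (pA s n t)) →
    ∀ (route : List Int) (vis : PySem.Set Int), (∀ x : Int, x ∈ vis ↔ x ∈ route) →
      (ts.foldl (stepB n tb) (route, vis)).1 = ts.foldl (stepA s n) route := by
  intro ts
  induction ts with
  | nil => intro _ route vis _; rfl
  | cons t ts ih =>
    intro hts route vis hinv
    have htb := hts t List.mem_cons_self
    have hts' : ∀ u ∈ ts, tb.get? u = (PySem.List.pyRange 1 n 1).find? (pA s n u) :=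
      fun u hu => hts u (List.mem_cons_of_mem _ hu)
    have hinv' : ∀ (c x : Int), x ∈ PySem.Set.add vis c ↔ x ∈ route ++ [c] := by
      intro c x
      rw [PySem.Set.mem_add]
      simp [hinv x]
    rw [List.foldl_cons, List.foldl_cons]
    simp only [stepB, stepA]
    rw [htb]
    cases hf : (PySem.List.pyRange 1 n 1).find? (pA s n t) with
    | some c =>
      exact ih hts' (route ++ [c]) (PySem.Set.add vis c) (hinv' c)
    | none =>
      have hfun : (fun u => !(PySem.Set.contains vis u)) = (fun c => !(route.contains c)) := by
        funext u
        by_cases h : u ∈ route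
        · have h2 : u ∈ vis := (hinv u).2 h
          simp [h, h2]
        · have h2 : u ∉ vis := fun hh => h ((hinv u).1 hh)
          simp [h, h2]
      rw [hfun]
      cases hg : (PySem.List.pyRange 1 n 1).find? (fun c => !(route.contains c)) with
      | some c => exact ih hts' (route ++ [c]) (PySem.Set.add vis c) (hinv' c)
      | none => exact ih hts' route vis hinv

-- ===== VERDICT (by name: the statement is the Claim_ definition above) =====
theorem decode_one_hot_to_route_spec : Claim_equal_decode_one_hot_to_route := by
  intro s n _
  unfold Spec_decode_one_hot_to_route
  by_cases hn : n ≤ 1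
  · rw [decodeA_eq, decodeB_eq, PySem.List.pyRange_one_eq_nil (by omega)]
    rfl
  · rw [decodeA_eq, decodeB_eq]
    refine (loop_eq s n (tbl s n) _ ?_ [0] (PySem.Set.ofList [0]) ?_).symm
    · intro t ht
      rw [PySem.List.mem_pyRange_one] at ht
      exact tbl_get_eq s n (by omega) t (by omega) (by omega)
    · intro x
      simp [PySem.Set.mem_ofList]
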